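-- pv_equiv track=rewrite | github.com/JBHutson/Poker | calc.py | checkSetToFullHouseOrFourOfAKind
-- ===== SOURCE A (Python) =====
-- from collections import Counter
--
-- def checkSetToFullHouseOrFourOfAKind(totalCards):
--     """ Check for a full house or four of a kind draw.
--
--     Params:
--     totalCards (list): list containing all of the cards in play
--
--     Returns:
--     Bool: true if there is a draw, false if not
--     """
--     cardVals = []
--
--     for card in totalCards:
--         cardVal = card[:-1]
--         cardVals.append(cardVal)
--
--     cardDict = Counter(cardVals)
--
--     for val in cardDict:
--         if cardDict.get(val) == 3:
--             return True
--
--     return False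
-- ===== SOURCE B (Python) =====
-- def checkSetToFullHouseOrFourOfAKind(totalCards):
--     """Sort the card values, then scan runs of equal consecutive values,
--     returning True iff some run has length exactly 3."""
--     vals = sorted(card[:-1] for card in totalCards)
--     run = 0
--     prev = None
--     for v in vals:
--         if run > 0 and v == prev:
--             run += 1
--         else:
--             if run == 3:
--                 return True
--             run = 1
--             prev = v
--     return run == 3
-- ===== Notes on version B (the rewrite author's own statement) =====
-- stated objective: alternative
-- what changed: Replaces the Counter frequency table and key loop by sorting the card values once and scanning consecutive equal-value runs, returning True when a run of length exactly 3 ends.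
import Mathlib
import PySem

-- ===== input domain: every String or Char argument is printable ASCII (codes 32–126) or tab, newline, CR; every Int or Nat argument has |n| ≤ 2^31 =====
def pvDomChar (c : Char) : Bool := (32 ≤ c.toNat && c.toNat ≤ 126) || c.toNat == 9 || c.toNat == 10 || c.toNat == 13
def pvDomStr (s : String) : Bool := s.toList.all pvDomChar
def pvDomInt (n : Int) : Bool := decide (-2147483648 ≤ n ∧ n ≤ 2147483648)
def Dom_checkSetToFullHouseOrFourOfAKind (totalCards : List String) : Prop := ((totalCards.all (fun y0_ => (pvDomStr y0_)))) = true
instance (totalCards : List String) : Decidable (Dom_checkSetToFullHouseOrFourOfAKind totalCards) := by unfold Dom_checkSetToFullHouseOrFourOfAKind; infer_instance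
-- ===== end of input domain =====

-- B replaces A's Counter table and key loop by sort-then-scan of equal-value runs (alternative algorithm, same result).

-- ===== PORT A =====
-- the 'for val in cardDict: if cardDict.get(val) == 3: return True' loop
def pvLoopA (d : PySem.Dict String Int) : List String → Bool
  | [] => false
  | v :: rest => if d.get? v == some 3 then true else pvLoopA d rest

def checkSetToFullHouseOrFourOfAKind (totalCards : List String) : Bool :=
  let cardVals := totalCards.foldl (fun acc card => acc ++ [PySem.Str.slice card none (some (-1))]) []
  let cardDict := PySem.Dict.counter cardVals
  pvLoopA cardDict cardDict.keys

-- ===== PORT B =====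
-- run scan: 'run'/'prev' loop of Source B after the first element has been seen
def pvRunGo (prev : String) (run : Nat) : List String → Bool
  | [] => run == 3
  | v :: rest => if v == prev then pvRunGo prev (run + 1) rest
                 else if run == 3 then true else pvRunGo v 1 rest

def checkSetToFullHouseOrFourOfAKind_alt (totalCards : List String) : Bool :=
  match PySem.List.sorted (totalCards.map (fun card => PySem.Str.slice card none (some (-1)))) (fun x => x) false with
  | [] => false
  | v :: rest => pvRunGo v 1 rest

-- ===== PRECONDITION & SPEC =====
def Spec_checkSetToFullHouseOrFourOfAKind (totalCards : List String) (out : Bool) : Prop := out = checkSetToFullHouseOrFourOfAKind_alt totalCards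
instance (totalCards : List String) (out : Bool) : Decidable (Spec_checkSetToFullHouseOrFourOfAKind totalCards out) := by unfold Spec_checkSetToFullHouseOrFourOfAKind; infer_instance

-- ===== CLAIM (what is proved, stated in full; the proofs are below) =====
def Claim_equal_checkSetToFullHouseOrFourOfAKind : Prop := ∀ (totalCards : List String), Dom_checkSetToFullHouseOrFourOfAKind totalCards → Spec_checkSetToFullHouseOrFourOfAKind totalCards (checkSetToFullHouseOrFourOfAKind totalCards)

-- ===== LEMMAS AND PROOFS =====

lemma pvLoopA_iff (d : PySem.Dict String Int) (l : List String) :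
    pvLoopA d l = true ↔ ∃ v ∈ l, d.get? v = some 3 := by
  induction l with
  | nil => simp [pvLoopA]
  | cons v rest ih =>
    simp only [pvLoopA]
    by_cases h : d.get? v = some 3
    · simp [h]
    · rw [if_neg (by simp [h]), ih]
      constructor
      · rintro ⟨w, hw, hwp⟩; exact ⟨w, by simp [hw], hwp⟩
      · rintro ⟨w, hw, hwp⟩
        rcases List.mem_cons.mp hw with rfl | hw'
        · exact absurd hwp h
        · exact ⟨w, hw', hwp⟩

lemma counter_get?_of_mem (xs : List String) (v : String) (hv : v ∈ xs) :
    (PySem.Dict.counter xs).get? v = some ((xs.count v : Int)) := by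
  refine PySem.Dict.get?_of_mem_items _ ?_ (PySem.Dict.nodup_keys_counter xs)
  rw [PySem.Dict.items_counter]
  exact List.mem_map.mpr ⟨v, (PySem.Set.mem_ofList xs v).mpr hv, rfl⟩

lemma portA_iff (xs : List String) :
    (pvLoopA (PySem.Dict.counter xs) (PySem.Dict.counter xs).keys = true) ↔
      ∃ v ∈ xs, xs.count v = 3 := by
  rw [pvLoopA_iff]
  constructor
  · rintro ⟨v, hmem, hp⟩
    rw [PySem.Dict.keys_counter, PySem.Set.mem_ofList] at hmem
    refine ⟨v, hmem, ?_⟩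
    rw [counter_get?_of_mem xs v hmem] at hp
    exact_mod_cast Option.some.inj hp
  · rintro ⟨v, hmem, hc⟩
    refine ⟨v, ?_, ?_⟩
    · rw [PySem.Dict.keys_counter, PySem.Set.mem_ofList]; exact hmem
    · rw [counter_get?_of_mem xs v hmem, hc]; rfl

lemma pvRunGo_cons_eq (prev v : String) (run : Nat) (rest : List String) (h : v = prev) :
    pvRunGo prev run (v :: rest) = pvRunGo prev (run + 1) rest := by
  simp [pvRunGo, h]

lemma pvRunGo_cons_ne (prev v : String) (run : Nat) (rest : List String) (h : v ≠ prev) :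
    pvRunGo prev run (v :: rest) = if run == 3 then true else pvRunGo v 1 rest := by
  simp [pvRunGo, h]

lemma pvRunGo_iff (l : List String) : ∀ (prev : String) (run : Nat),
    (prev :: l).Pairwise (· ≤ ·) →
    (pvRunGo prev run l = true ↔
      (run + l.count prev = 3 ∨ ∃ v ∈ l, v ≠ prev ∧ l.count v = 3)) := by
  induction l with
  | nil => intro prev run _; simp [pvRunGo]
  | cons v rest ih =>
    intro prev run hp
    have hp' : (v :: rest).Pairwise (· ≤ ·) := hp.tail
    have hprevv : prev ≤ v := (List.pairwise_cons.mp hp).1 v (by simp)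
    by_cases hv : v = prev
    · subst hv
      rw [pvRunGo_cons_eq v v run rest rfl, ih v (run + 1) hp']
      constructor
      · rintro (h | ⟨w, hw, hwne, hwc⟩)
        · left; simp; omega
        · right
          have hne' : ¬ (v = w) := fun h => hwne h.symm
          exact ⟨w, by simp [hw], hwne, by simp [hne']; omega⟩
      · rintro (h | ⟨w, hw, hwne, hwc⟩)
        · left; simp at h ⊢; omega
        · right
          rcases List.mem_cons.mp hw with rfl | hw'
          · exact absurd rfl hwne
          · have hne' : ¬ (v = w) := fun h => hwne h.symm
            refine ⟨w, hw', hwne, ?_⟩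
            simp [hne'] at hwc; omega
    · have hlt : prev < v := lt_of_le_of_ne hprevv (fun h => hv h.symm)
      have hrest : ∀ x ∈ rest, v ≤ x := (List.pairwise_cons.mp hp').1
      have hprev_not : ∀ x ∈ v :: rest, x ≠ prev := by
        intro x hx
        rcases List.mem_cons.mp hx with rfl | hx'
        · exact fun h => hv h
        · intro h; subst h; exact absurd (hrest x hx') (not_le.mpr hlt)
      have hcount0 : (v :: rest).count prev = 0 := by
        rw [List.count_eq_zero]
        intro h; exact hprev_not prev h rfl
      rw [pvRunGo_cons_ne prev v run rest hv, hcount0]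
      by_cases hr : run = 3
      · subst hr
        rw [if_pos (show ((3:Nat) == 3) = true by decide)]
        simp
      · rw [if_neg (by simpa using hr), ih v 1 hp']
        constructor
        · rintro (h | ⟨w, hw, hwne, hwc⟩)
          · right
            refine ⟨v, by simp, fun h' => hv h', ?_⟩
            simp; omega
          · right
            have hne' : ¬ (v = w) := fun h => hwne h.symm
            refine ⟨w, by simp [hw], hprev_not w (by simp [hw]), ?_⟩
            simp [hne']; omega
        · rintro (h | ⟨w, hw, hwne, hwc⟩)
          · omega
          · rcases List.mem_cons.mp hw with rfl | hw'
            · left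
              simp at hwc
              omega
            · by_cases hwv : w = v
              · subst hwv
                left; simp at hwc; omega
              · right
                have hne' : ¬ (v = w) := fun h => hwv h.symm
                refine ⟨w, hw', hwv, ?_⟩
                simp [hne'] at hwc; omega

lemma portB_iff (xs : List String) :
    (checkSetToFullHouseOrFourOfAKind_alt xs = true) ↔
      ∃ v ∈ xs.map (fun card => PySem.Str.slice card none (some (-1))),
        (xs.map (fun card => PySem.Str.slice card none (some (-1)))).count v = 3 := by
  set vals := xs.map (fun card => PySem.Str.slice card none (some (-1))) with hvals
  have hperm : (PySem.List.sorted vals (fun x => x) false).Perm vals :=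
    PySem.List.sorted_perm vals (fun x => x) false
  have hpair : (PySem.List.sorted vals (fun x => x) false).Pairwise (· ≤ ·) := by
    simpa using PySem.List.sorted_pairwise vals (fun x => x)
  unfold checkSetToFullHouseOrFourOfAKind_alt
  rw [← hvals]
  have hmemiff : ∀ v, v ∈ PySem.List.sorted vals (fun x => x) false ↔ v ∈ vals :=
    fun v => hperm.mem_iff
  have hcnt : ∀ v, (PySem.List.sorted vals (fun x => x) false).count v = vals.count v :=
    fun v => hperm.count_eq v
  rcases hs : PySem.List.sorted vals (fun x => x) false with _ | ⟨v, rest⟩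
  · simp only [Bool.false_eq_true, false_iff]
    rintro ⟨w, hw, -⟩
    rw [← hmemiff w, hs] at hw
    exact absurd hw (List.not_mem_nil)
  · rw [hs] at hpair hmemiff hcnt
    rw [pvRunGo_iff rest v 1 hpair]
    constructor
    · rintro (h | ⟨w, hw, hwne, hwc⟩)
      · refine ⟨v, (hmemiff v).mp (by simp), ?_⟩
        rw [← hcnt v]; simp; omega
      · have hne' : ¬ (v = w) := fun h => hwne h.symm
        refine ⟨w, (hmemiff w).mp (by simp [hw]), ?_⟩
        rw [← hcnt w]; simp [hne']; omega
    · rintro ⟨w, hw, hwc⟩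
      rw [← hmemiff w] at hw
      rw [← hcnt w] at hwc
      rcases List.mem_cons.mp hw with rfl | hw'
      · left; simp at hwc; omega
      · by_cases hwv : w = v
        · subst hwv; left; simp at hwc; omega
        · right
          have hne' : ¬ (v = w) := fun h => hwv h.symm
          refine ⟨w, hw', hwv, ?_⟩
          simp [hne'] at hwc; omega

lemma foldl_vals (xs : List String) :
    xs.foldl (fun acc card => acc ++ [PySem.Str.slice card none (some (-1))]) [] =
      xs.map (fun card => PySem.Str.slice card none (some (-1))) := by
  simpa using PySem.List.foldl_append_singleton_eq_map (fun card => PySem.Str.slice card none (some (-1))) xs []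

-- ===== VERDICT (by name: the statement is the Claim_ definition above) =====
theorem checkSetToFullHouseOrFourOfAKind_spec : Claim_equal_checkSetToFullHouseOrFourOfAKind := by
  intro totalCards _
  unfold Spec_checkSetToFullHouseOrFourOfAKind
  rw [Bool.eq_iff_iff]
  unfold checkSetToFullHouseOrFourOfAKind
  simp only [foldl_vals]
  rw [portA_iff, portB_iff]
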